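-- pv_equiv track=rewrite | github.com/joaoMarcello/my-firework-algorithm | utils.py | expand_pattern
-- ===== SOURCE A (Python) =====
-- import itertools
--
-- def expand_pattern(pattern_elements, shift_groups):
--     """
--     Expande um padrão ORTEC com elementos <Shift> e <ShiftGroup> em todas as combinações possíveis.
--     Retorna uma lista de strings com os padrões expandidos, usando '-' para 'OFF'.
--     """
--     symbol_options = []
--
--     for el in pattern_elements:
--         if "Shift" in el:
--             shift = el["Shift"]
--             symbol = "-" if shift.upper() == "OFF" else shift
--             symbol_options.append([symbol])
--         elif "ShiftGroup" in el:
--             group_id = el["ShiftGroup"]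
--             group_shifts = shift_groups.get(group_id, [])
--             group_symbols = ["-" if s.upper() == "OFF" else s for s in group_shifts]
--             symbol_options.append(group_symbols)
--         else:
--             # Se o XML contiver algo inesperado
--             symbol_options.append(["?"])
--
--     # Produto cartesiano para formar todas as combinações possíveis
--     combinations = itertools.product(*symbol_options)
--     expanded = ["".join(seq) for seq in combinations]
--     return expanded
-- ===== SOURCE B (Python) =====
-- def expand_pattern(pattern_elements, shift_groups):
--     options = []
--     for el in pattern_elements:
--         if "Shift" in el:
--             shift = el["Shift"]
--             options.append(["-" if shift.upper() == "OFF" else shift])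
--         elif "ShiftGroup" in el:
--             options.append(["-" if s.upper() == "OFF" else s
--                             for s in shift_groups.get(el["ShiftGroup"], [])])
--         else:
--             options.append(["?"])
--
--     total = 1
--     for o in options:
--         total *= len(o)
--
--     result = []
--     for k in range(total):
--         rem = k
--         parts = []
--         for o in reversed(options):
--             rem, d = divmod(rem, len(o))
--             parts.append(o[d])
--         result.append("".join(reversed(parts)))
--     return result
-- ===== Notes on version B (the rewrite author's own statement) =====
-- stated objective: alternative
-- what changed: Replaces the itertools.product recursion by mixed-radix index arithmetic: B counts the total number of combinations and, for each index k in range(total), decodes k with divmod into one digit per position to index directly into the option lists.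
import Mathlib
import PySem

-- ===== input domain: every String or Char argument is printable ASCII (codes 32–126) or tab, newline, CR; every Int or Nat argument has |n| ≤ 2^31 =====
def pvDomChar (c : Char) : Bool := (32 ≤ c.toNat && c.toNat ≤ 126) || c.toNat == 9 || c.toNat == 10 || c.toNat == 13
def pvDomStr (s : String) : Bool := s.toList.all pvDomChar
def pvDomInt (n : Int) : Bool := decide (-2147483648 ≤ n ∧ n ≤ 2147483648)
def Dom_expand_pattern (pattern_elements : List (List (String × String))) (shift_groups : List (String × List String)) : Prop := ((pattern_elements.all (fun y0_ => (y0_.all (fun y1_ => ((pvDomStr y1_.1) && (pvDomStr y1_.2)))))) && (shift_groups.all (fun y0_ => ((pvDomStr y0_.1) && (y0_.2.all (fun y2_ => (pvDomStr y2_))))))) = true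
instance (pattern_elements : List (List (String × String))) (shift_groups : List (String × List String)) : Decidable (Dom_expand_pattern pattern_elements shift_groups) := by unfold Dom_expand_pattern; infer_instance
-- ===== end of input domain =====

-- B drops itertools.product: it counts the combinations and decodes each index k in range(total)
-- with mixed-radix divmod arithmetic into direct indices into the option lists; same outputs, same order.

-- per-element symbol options (the same value both Pythons compute for each element)
def pvElemOptions (shift_groups : List (String × List String)) (el : List (String × String)) : List String :=
  match (PySem.Dict.ofList el).get? "Shift" with
  | some shift => [if PySem.Str.upper shift == "OFF" then "-" else shift]
  | none =>
    match (PySem.Dict.ofList el).get? "ShiftGroup" with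
    | some group_id =>
        ((PySem.Dict.ofList shift_groups).getD group_id []).map
          (fun s => if PySem.Str.upper s == "OFF" then "-" else s)
    | none => ["?"]

-- ===== PORT A =====
-- itertools.product(*lists): leftmost factor varies slowest
def pvProduct : List (List String) → List (List String)
  | [] => [[]]
  | o :: rest => o.flatMap (fun x => (pvProduct rest).map (fun t => x :: t))

def expand_pattern (pattern_elements : List (List (String × String))) (shift_groups : List (String × List String)) : List String :=
  let symbol_options := pattern_elements.foldl (fun acc el => acc ++ [pvElemOptions shift_groups el]) []
  let combinations := pvProduct symbol_options
  combinations.map (fun seq => PySem.Str.join "" seq)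

-- ===== PORT B =====
def expand_pattern_alt (pattern_elements : List (List (String × String))) (shift_groups : List (String × List String)) : List String :=
  let options := pattern_elements.foldl (fun acc el => acc ++ [pvElemOptions shift_groups el]) []
  let total := options.foldl (fun t o => t * o.length) 1
  (List.range total).foldl
    (fun result k =>
      -- rem, parts loop over reversed(options); divmod(rem, len(o)); o[d] is always in range here
      let st := options.reverse.foldl
        (fun (s : Nat × List String) o => (s.1 / o.length, s.2 ++ [o.getD (s.1 % o.length) ""]))
        (k, [])
      result ++ [PySem.Str.join "" st.2.reverse])
    []

-- ===== PRECONDITION & SPEC =====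
def Spec_expand_pattern (pattern_elements : List (List (String × String))) (shift_groups : List (String × List String)) (out : List String) : Prop := out = expand_pattern_alt pattern_elements shift_groups
instance (pattern_elements : List (List (String × String))) (shift_groups : List (String × List String)) (out : List String) : Decidable (Spec_expand_pattern pattern_elements shift_groups out) := by unfold Spec_expand_pattern; infer_instance

-- ===== CLAIM (what is proved, stated in full; the proofs are below) =====
def Claim_equal_expand_pattern : Prop := ∀ (pattern_elements : List (List (String × String))) (shift_groups : List (String × List String)), Dom_expand_pattern pattern_elements shift_groups → Spec_expand_pattern pattern_elements shift_groups (expand_pattern pattern_elements shift_groups)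

-- ===== LEMMAS AND PROOFS =====

-- number of combinations
def pvTotal (opts : List (List String)) : Nat := (opts.map List.length).prod

-- left-to-right mixed-radix decoding of index k (head digit = (k / pvTotal rest) % |o|)
def pvDecodeL : List (List String) → Nat → List String
  | [], _ => []
  | o :: rest, k => o.getD ((k / pvTotal rest) % o.length) "" :: pvDecodeL rest k

theorem pvTotal_foldl (opts : List (List String)) (t : Nat) :
    opts.foldl (fun t o => t * o.length) t = t * pvTotal opts := by
  induction opts generalizing t with
  | nil => simp [pvTotal]
  | cons o rest ih => simp [pvTotal, ih, mul_assoc]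

-- the reversed divmod loop computes exactly the reversed left-to-right digits
theorem pv_fold_decode (opts : List (List String)) (k : Nat) (ps : List String) :
    opts.reverse.foldl
        (fun (s : Nat × List String) o => (s.1 / o.length, s.2 ++ [o.getD (s.1 % o.length) ""]))
        (k, ps)
      = (k / pvTotal opts, ps ++ (pvDecodeL opts k).reverse) := by
  induction opts generalizing k ps with
  | nil => simp [pvTotal, pvDecodeL]
  | cons o rest ih =>
      simp only [List.reverse_cons, List.foldl_append, ih, List.foldl_cons, List.foldl_nil,
        pvDecodeL, pvTotal, List.map_cons, List.prod_cons, List.reverse_cons]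
      rw [Nat.div_div_eq_div_mul, Nat.mul_comm _ o.length]
      simp

-- digits of k only depend on k modulo the total
theorem pv_decode_shift (rest : List (List String)) (i j : Nat) :
    pvDecodeL rest (i * pvTotal rest + j) = pvDecodeL rest j := by
  induction rest generalizing i j with
  | nil => simp [pvDecodeL]
  | cons o r ih =>
      have hT : pvTotal (o :: r) = o.length * pvTotal r := by simp [pvTotal]
      by_cases h : pvTotal r = 0
      · simp [pvDecodeL, hT, h] at *
      · have hpos : 0 < pvTotal r := Nat.pos_of_ne_zero h
        simp only [pvDecodeL, hT]
        congr 1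
        · congr 1
          rw [show i * (o.length * pvTotal r) + j = pvTotal r * (i * o.length) + j by ring]
          rw [Nat.mul_add_div hpos, Nat.add_comm, Nat.add_mul_mod_self_right]
        · rw [show i * (o.length * pvTotal r) + j = (i * o.length) * pvTotal r + j by ring]
          exact ih (i * o.length) j

theorem pv_range_mul (a b : Nat) :
    List.range (a * b) = (List.range a).flatMap (fun i => (List.range b).map (fun j => i * b + j)) := by
  induction a with
  | zero => simp
  | succ a ih =>
      rw [Nat.succ_mul, List.range_add, ih, List.range_succ, List.flatMap_append]
      simp [List.flatMap]

theorem pv_list_eq_map_range_getD (l : List String) :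
    l = (List.range l.length).map (fun i => l.getD i "") := by
  apply List.ext_getElem
  · simp
  · intro i h1 h2
    simp only [List.getElem_map, List.getElem_range]
    rw [List.getD_eq_getElem l "" h1]

-- the decoded indices enumerate exactly itertools.product, in order
theorem pv_decode_product (opts : List (List String)) :
    (List.range (pvTotal opts)).map (pvDecodeL opts) = pvProduct opts := by
  induction opts with
  | nil => simp [pvTotal, pvDecodeL, pvProduct]
  | cons o rest ih =>
      have hT : pvTotal (o :: rest) = o.length * pvTotal rest := by simp [pvTotal]
      rw [hT, pv_range_mul, List.map_flatMap]
      have hstep : ∀ i ∈ List.range o.length,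
          ((List.range (pvTotal rest)).map (fun j => i * pvTotal rest + j)).map (pvDecodeL (o :: rest))
            = (pvProduct rest).map (fun t => o.getD i "" :: t) := by
        intro i hi
        have hi' : i < o.length := List.mem_range.mp hi
        rw [List.map_map, ← ih, List.map_map]
        apply List.map_congr_left
        intro j hj
        have hj' : j < pvTotal rest := List.mem_range.mp hj
        simp only [Function.comp_apply, pvDecodeL, pv_decode_shift]
        congr 2
        by_cases h : pvTotal rest = 0
        · omega
        · have hpos : 0 < pvTotal rest := Nat.pos_of_ne_zero h
          rw [Nat.mul_comm i, Nat.mul_add_div hpos, Nat.div_eq_of_lt hj', Nat.add_zero,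
            Nat.mod_eq_of_lt hi']
      calc (List.range o.length).flatMap
              (fun i => ((List.range (pvTotal rest)).map (fun j => i * pvTotal rest + j)).map (pvDecodeL (o :: rest)))
          = (List.range o.length).flatMap (fun i => (pvProduct rest).map (fun t => o.getD i "" :: t)) := by
            rw [List.flatMap_def, List.flatMap_def, List.map_congr_left hstep]
        _ = pvProduct (o :: rest) := by
            conv_rhs => rw [pvProduct, pv_list_eq_map_range_getD o]
            rw [List.flatMap_map]

-- ===== VERDICT (by name: the statement is the Claim_ definition above) =====
theorem expand_pattern_spec : Claim_equal_expand_pattern := by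
  intro pes sgs _
  unfold Spec_expand_pattern expand_pattern expand_pattern_alt
  rw [PySem.List.foldl_append_singleton_eq_map]
  simp only [List.nil_append, pvTotal_foldl, Nat.one_mul]
  rw [PySem.List.foldl_append_singleton_eq_map]
  simp only [pv_fold_decode, List.nil_append, List.reverse_reverse]
  rw [← pv_decode_product, List.map_map]
  simp [Function.comp_def]
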